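-- pv_equiv track=rewrite | github.com/Bams29/bryan_moreno | day4/ejercise2_morenoBryan.py | nearest_leg_lengths
-- ===== SOURCE A (Python) =====
-- import itertools
--
-- def nearest_leg_lengths(coin_thicknesses, table_heights):
--     def possible_leg_lengths(coin_thicknesses, target_height):
--         min_leg_length = float('inf')
--         max_leg_length = 0
--         for i in range(1, len(coin_thicknesses) + 1):
--             for combination in itertools.combinations(coin_thicknesses, i):
--                 total_thickness = sum(combination)
--                 if min_leg_length > total_thickness:
--                     min_leg_length = total_thickness
--                 if max_leg_length < total_thickness <= target_height:
--                     max_leg_length = total_thickness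
--         return min_leg_length, max_leg_length
--
--     results = []
--     for table_height in table_heights:
--         min_leg_length, max_leg_length = possible_leg_lengths(coin_thicknesses, table_height)
--         results.append((min_leg_length, max_leg_length))
--     return results
-- ===== SOURCE B (Python) =====
-- def nearest_leg_lengths(coin_thicknesses, table_heights):
--     # achievable sums of nonempty sub-multisets, computed once for all targets
--     sums = set()
--     for c in coin_thicknesses:
--         sums = sums | {s + c for s in sums} | {c}
--     srt = sorted(sums)
--     results = []
--     for h in table_heights:
--         best = 0
--         for s in srt:
--             if s <= h and s > best:
--                 best = s
--         results.append((srt[0], best))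
--     return results
-- ===== Notes on version B (the rewrite author's own statement) =====
-- stated objective: faster
-- what changed: B builds the set of achievable nonempty-subset sums once with an incremental subset-sum set (instead of re-enumerating all 2^n itertools combinations for every target height), sorts it, and answers each target by a single scan of the distinct sums.
-- outside the precondition, e.g. on nearest_leg_lengths([], [5]): A returns [(inf, 0)], B raises IndexError
import Mathlib
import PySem

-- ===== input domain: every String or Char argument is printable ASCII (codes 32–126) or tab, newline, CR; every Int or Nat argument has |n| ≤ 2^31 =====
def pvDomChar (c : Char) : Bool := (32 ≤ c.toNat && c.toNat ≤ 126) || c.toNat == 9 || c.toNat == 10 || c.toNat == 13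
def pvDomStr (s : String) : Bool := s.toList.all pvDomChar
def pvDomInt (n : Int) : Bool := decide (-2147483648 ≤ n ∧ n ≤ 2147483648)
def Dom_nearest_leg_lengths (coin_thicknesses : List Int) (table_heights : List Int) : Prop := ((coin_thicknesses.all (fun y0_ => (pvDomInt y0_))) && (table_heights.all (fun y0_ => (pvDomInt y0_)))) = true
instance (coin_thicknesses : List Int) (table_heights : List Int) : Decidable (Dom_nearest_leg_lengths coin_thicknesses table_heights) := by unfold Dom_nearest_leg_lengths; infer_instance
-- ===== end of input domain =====

-- B computes the distinct achievable subset sums ONCE (incremental subset-sum set) instead of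
-- re-enumerating every itertools combination for every target height; objective: faster.

-- ===== PORT A =====
-- 'if min_leg_length > total_thickness: min_leg_length = total_thickness' with min starting as
-- float('inf'): modelled as Option Int, none = inf.  It is still none at the end only when
-- coin_thicknesses = [] (no combination exists), which Pre_ excludes; there '.getD 0' is used.
def pvMinStep (m : Option Int) (t : Int) : Option Int :=
  match m with
  | none => some t
  | some m' => if m' > t then some t else some m'

-- 'if max_leg_length < total_thickness <= target_height: max_leg_length = total_thickness'
def pvMaxStep (target : Int) (b : Int) (t : Int) : Int :=
  if b < t ∧ t ≤ target then t else b

def possible_leg_lengths (coin_thicknesses : List Int) (target_height : Int) : Int × Int :=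
  -- for i in range(1, len(coin_thicknesses)+1): for combination in itertools.combinations(…, i): …
  -- (i ≥ 1 throughout the range, so 'i.toNat' is exact for the Nat argument of combinations)
  let st := (PySem.List.pyRange 1 (coin_thicknesses.length + 1) 1).foldl
    (fun (st : Option Int × Int) i =>
      (PySem.List.combinations coin_thicknesses i.toNat).foldl
        (fun (st : Option Int × Int) combination =>
          (pvMinStep st.1 combination.sum, pvMaxStep target_height st.2 combination.sum)) st)
    (none, 0)
  (st.1.getD 0, st.2)

def nearest_leg_lengths (coin_thicknesses : List Int) (table_heights : List Int) : List (Int × Int) :=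
  table_heights.foldl
    (fun results table_height => results ++ [possible_leg_lengths coin_thicknesses table_height]) []

-- ===== PORT B =====
def nearest_leg_lengths_alt (coin_thicknesses : List Int) (table_heights : List Int) : List (Int × Int) :=
  -- sums = set(); for c in coins: sums = sums | {s + c for s in sums} | {c}
  let sums : PySem.Set Int := coin_thicknesses.foldl
    (fun (s : PySem.Set Int) c =>
      PySem.Set.union (PySem.Set.union s (s.map (fun x => x + c))) [c])
    PySem.Set.empty
  let srt := PySem.List.sorted sums (fun x => x) false
  table_heights.foldl
    (fun results h =>
      let best := srt.foldl (fun best s => if s ≤ h ∧ best < s then s else best) 0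
      -- srt[0]: IndexError on an empty list lies outside Pre_; pyGet? is none there, defaulted
      results ++ [((PySem.List.pyGet? srt 0).getD 0, best)]) []

-- ===== PRECONDITION & SPEC =====
-- Pre_ excludes only coin_thicknesses = [] with table_heights ≠ []: there A returns the float
-- inf (not an Int) as min_leg_length, and B raises IndexError on srt[0].
def Pre_nearest_leg_lengths (coin_thicknesses : List Int) (table_heights : List Int) : Prop :=
  table_heights = [] ∨ coin_thicknesses ≠ []
instance (coin_thicknesses : List Int) (table_heights : List Int) : Decidable (Pre_nearest_leg_lengths coin_thicknesses table_heights) := by unfold Pre_nearest_leg_lengths; infer_instance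

def pvWitness_nearest_leg_lengths : List Int × List Int := ([2, 3], [4, 1])

def Spec_nearest_leg_lengths (coin_thicknesses : List Int) (table_heights : List Int) (out : List (Int × Int)) : Prop := out = nearest_leg_lengths_alt coin_thicknesses table_heights
instance (coin_thicknesses : List Int) (table_heights : List Int) (out : List (Int × Int)) : Decidable (Spec_nearest_leg_lengths coin_thicknesses table_heights out) := by unfold Spec_nearest_leg_lengths; infer_instance

-- ===== CLAIM (what is proved, stated in full; the proofs are below) =====
def Claim_equal_nearest_leg_lengths : Prop := ∀ (coin_thicknesses : List Int) (table_heights : List Int), Dom_nearest_leg_lengths coin_thicknesses table_heights → Pre_nearest_leg_lengths coin_thicknesses table_heights → Spec_nearest_leg_lengths coin_thicknesses table_heights (nearest_leg_lengths coin_thicknesses table_heights)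

-- ===== LEMMAS AND PROOFS =====

-- x is the sum of a nonempty sub-multiset (order-respecting sublist) of coins
def SumP (coins : List Int) (x : Int) : Prop := ∃ t : List Int, t.Sublist coins ∧ t ≠ [] ∧ t.sum = x

-- the multiset of totals A enumerates, flattened
def totalsA (coins : List Int) : List Int :=
  (PySem.List.pyRange 1 ((coins.length : Int) + 1) 1).flatMap
    (fun i => (PySem.List.combinations coins i.toNat).map List.sum)

lemma mem_totalsA (coins : List Int) (x : Int) : x ∈ totalsA coins ↔ SumP coins x := by
  simp only [totalsA, List.mem_flatMap, List.mem_map, PySem.List.mem_pyRange_one,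
    PySem.List.mem_combinations_iff, SumP]
  constructor
  · rintro ⟨i, ⟨h1, h2⟩, c, ⟨hsub, hlen⟩, hsum⟩
    refine ⟨c, hsub, ?_, hsum⟩
    intro hnil; subst hnil; simp at hlen; omega
  · rintro ⟨t, hsub, hne, hsum⟩
    refine ⟨(t.length : Int), ⟨?_, ?_⟩, t, ⟨hsub, by simp⟩, hsum⟩
    · have := List.length_pos_iff.mpr hne; omega
    · have := hsub.length_le; omega

lemma mem_sums_fold (coins : List Int) (s0 : List Int) (x : Int) :
    x ∈ coins.foldl
      (fun (s : PySem.Set Int) c =>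
        PySem.Set.union (PySem.Set.union s (s.map (fun y => y + c))) [c]) s0 ↔
    ((∃ b ∈ s0, ∃ t : List Int, t.Sublist coins ∧ b + t.sum = x) ∨ SumP coins x) := by
  induction coins generalizing s0 with
  | nil =>
    simp only [List.foldl_nil, SumP, List.sublist_nil]
    constructor
    · intro hx
      exact Or.inl ⟨x, hx, [], by simp, by simp⟩
    · rintro (⟨b, hb, t, rfl, hs⟩ | ⟨t, rfl, hne, hs⟩)
      · simp only [List.sum_nil, Int.add_zero] at hs
        subst hs; exact hb
      · exact absurd rfl hne
  | cons c rest ih =>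
    rw [List.foldl_cons, ih]
    constructor
    · rintro (⟨b, hb, t, ht, hs⟩ | ⟨t, ht, hne, hs⟩)
      · rw [PySem.Set.mem_union, PySem.Set.mem_union] at hb
        rcases hb with (hb | hb) | hb
        · exact Or.inl ⟨b, hb, t, ht.cons c, hs⟩
        · rcases List.mem_map.mp hb with ⟨b0, hb0, rfl⟩
          exact Or.inl ⟨b0, hb0, c :: t, ht.cons₂ c, by simp at hs ⊢; omega⟩
        · simp only [List.mem_singleton] at hb
          refine Or.inr ⟨c :: t, ht.cons₂ c, by simp, ?_⟩
          rw [← hb]; simp at hs ⊢; omega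
      · exact Or.inr ⟨t, ht.cons c, hne, hs⟩
    · rintro (⟨b, hb, t, ht, hs⟩ | ⟨t, ht, hne, hs⟩)
      · rcases List.sublist_cons_iff.mp ht with ht' | ⟨r, rfl, hr⟩
        · exact Or.inl ⟨b, by simp [PySem.Set.mem_union, hb], t, ht', hs⟩
        · refine Or.inl ⟨b + c, ?_, r, hr, by simp at hs ⊢; omega⟩
          rw [PySem.Set.mem_union, PySem.Set.mem_union]
          exact Or.inl (Or.inr (List.mem_map.mpr ⟨b, hb, rfl⟩))
      · rcases List.sublist_cons_iff.mp ht with ht' | ⟨r, rfl, hr⟩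
        · exact Or.inr ⟨t, ht', hne, hs⟩
        · refine Or.inl ⟨c, ?_, r, hr, by simp at hs ⊢; omega⟩
          rw [PySem.Set.mem_union]
          exact Or.inr (List.mem_singleton.mpr rfl)

def pvSums (coins : List Int) : PySem.Set Int :=
  coins.foldl
    (fun (s : PySem.Set Int) c =>
      PySem.Set.union (PySem.Set.union s (s.map (fun y => y + c))) [c])
    PySem.Set.empty

lemma mem_pvSums (coins : List Int) (x : Int) : x ∈ pvSums coins ↔ SumP coins x := by
  rw [pvSums, mem_sums_fold]
  simp [PySem.Set.empty]

lemma minFold_some (l : List Int) (a : Int) :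
    ∃ m, l.foldl pvMinStep (some a) = some m ∧ (m = a ∨ m ∈ l) ∧ m ≤ a ∧ ∀ y ∈ l, m ≤ y := by
  induction l generalizing a with
  | nil => exact ⟨a, rfl, Or.inl rfl, le_refl _, by simp⟩
  | cons x t ih =>
    rw [List.foldl_cons]
    by_cases h : a > x
    · simp only [pvMinStep, if_pos h]
      obtain ⟨m, h1, h2, h3, h4⟩ := ih x
      refine ⟨m, h1, ?_, by omega, ?_⟩
      · rcases h2 with h2 | h2
        · exact Or.inr (by simp [h2])
        · exact Or.inr (List.mem_cons.mpr (Or.inr h2))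
      · intro y hy
        rcases List.mem_cons.mp hy with hy | hy
        · omega
        · exact h4 y hy
    · simp only [pvMinStep, if_neg h]
      obtain ⟨m, h1, h2, h3, h4⟩ := ih a
      refine ⟨m, h1, ?_, h3, ?_⟩
      · rcases h2 with h2 | h2
        · exact Or.inl h2
        · exact Or.inr (List.mem_cons.mpr (Or.inr h2))
      · intro y hy
        rcases List.mem_cons.mp hy with hy | hy
        · omega
        · exact h4 y hy

lemma minFold_nil_init (l : List Int) (hl : l ≠ []) :
    ∃ m, l.foldl pvMinStep none = some m ∧ m ∈ l ∧ ∀ y ∈ l, m ≤ y := by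
  cases l with
  | nil => exact absurd rfl hl
  | cons x t =>
    rw [List.foldl_cons]
    obtain ⟨m, h1, h2, h3, h4⟩ := minFold_some t x
    refine ⟨m, h1, ?_, ?_⟩
    · rcases h2 with h2 | h2
      · simp [h2]
      · exact List.mem_cons.mpr (Or.inr h2)
    · intro y hy
      rcases List.mem_cons.mp hy with hy | hy
      · omega
      · exact h4 y hy

lemma maxFold_spec (target : Int) (l : List Int) (b0 : Int) :
    (l.foldl (pvMaxStep target) b0 = b0 ∨
      (l.foldl (pvMaxStep target) b0 ∈ l ∧ l.foldl (pvMaxStep target) b0 ≤ target)) ∧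
    b0 ≤ l.foldl (pvMaxStep target) b0 ∧
    ∀ y ∈ l, y ≤ target → y ≤ l.foldl (pvMaxStep target) b0 := by
  induction l generalizing b0 with
  | nil => exact ⟨Or.inl rfl, le_refl _, by simp⟩
  | cons x t ih =>
    rw [List.foldl_cons]
    by_cases h : b0 < x ∧ x ≤ target
    · simp only [pvMaxStep, if_pos h]
      obtain ⟨h1, h2, h3⟩ := ih x
      refine ⟨?_, by omega, ?_⟩
      · rcases h1 with h1 | ⟨ha, hb⟩
        · exact Or.inr ⟨by simp [h1], by omega⟩
        · exact Or.inr ⟨List.mem_cons.mpr (Or.inr ha), hb⟩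
      · intro y hy hyt
        rcases List.mem_cons.mp hy with hy | hy
        · subst hy; omega
        · exact h3 y hy hyt
    · simp only [pvMaxStep, if_neg h]
      obtain ⟨h1, h2, h3⟩ := ih b0
      refine ⟨?_, h2, ?_⟩
      · rcases h1 with h1 | ⟨ha, hb⟩
        · exact Or.inl h1
        · exact Or.inr ⟨List.mem_cons.mpr (Or.inr ha), hb⟩
      · intro y hy hyt
        rcases List.mem_cons.mp hy with hy | hy
        · subst hy; omega
        · exact h3 y hy hyt

lemma maxFold_congr_mem (target : Int) (l1 l2 : List Int) (hmem : ∀ x, x ∈ l1 ↔ x ∈ l2) :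
    l1.foldl (pvMaxStep target) 0 = l2.foldl (pvMaxStep target) 0 := by
  obtain ⟨c1, i1, u1⟩ := maxFold_spec target l1 0
  obtain ⟨c2, i2, u2⟩ := maxFold_spec target l2 0
  have h12 : l1.foldl (pvMaxStep target) 0 ≤ l2.foldl (pvMaxStep target) 0 := by
    rcases c1 with h | ⟨hm, ht⟩
    · omega
    · exact u2 _ ((hmem _).mp hm) ht
  have h21 : l2.foldl (pvMaxStep target) 0 ≤ l1.foldl (pvMaxStep target) 0 := by
    rcases c2 with h | ⟨hm, ht⟩
    · omega
    · exact u1 _ ((hmem _).mpr hm) ht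
  omega

-- B's inner-loop step is A's max update with the conjuncts swapped
lemma bstep_eq_maxStep (h : Int) :
    (fun (best s : Int) => if s ≤ h ∧ best < s then s else best) = pvMaxStep h := by
  funext b s
  by_cases h1 : s ≤ h <;> by_cases h2 : b < s <;> simp [pvMaxStep, h1, h2]

-- A's nested loops over range(1, n+1) × combinations are a single fold over totalsA, split per component
lemma possible_eq (coins : List Int) (target : Int) :
    possible_leg_lengths coins target =
      (((totalsA coins).foldl pvMinStep none).getD 0,
        (totalsA coins).foldl (pvMaxStep target) 0) := by
  rw [possible_leg_lengths]
  have hflat : ∀ (l : List Int) (init : Option Int × Int),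
      l.foldl (fun st i => (PySem.List.combinations coins i.toNat).foldl
          (fun (st : Option Int × Int) combination =>
            (pvMinStep st.1 combination.sum, pvMaxStep target st.2 combination.sum)) st) init =
      (l.flatMap (fun i => (PySem.List.combinations coins i.toNat).map List.sum)).foldl
          (fun (st : Option Int × Int) t => (pvMinStep st.1 t, pvMaxStep target st.2 t)) init := by
    intro l
    induction l with
    | nil => intro init; rfl
    | cons x xs ih =>
      intro init
      rw [List.foldl_cons, ih, List.flatMap_cons, List.foldl_append, List.foldl_map]
  rw [hflat, PySem.List.foldl_prod_mk (f := pvMinStep) (g := pvMaxStep target)]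
  rfl

lemma totalsA_ne_nil (coins : List Int) (hc : coins ≠ []) : totalsA coins ≠ [] := by
  cases coins with
  | nil => exact absurd rfl hc
  | cons c rest =>
    intro hnil
    have : c ∈ totalsA (c :: rest) :=
      (mem_totalsA _ _).mpr ⟨[c], by simp [List.cons_sublist_cons], by simp, by simp⟩
    rw [hnil] at this; exact absurd this (List.not_mem_nil)

-- per-height equality of the two pairs, for a nonempty coin list
lemma pair_eq (coins : List Int) (h : Int) (hc : coins ≠ []) :
    possible_leg_lengths coins h =
      ((PySem.List.pyGet? (PySem.List.sorted (pvSums coins) (fun x => x) false) 0).getD 0,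
        (PySem.List.sorted (pvSums coins) (fun x => x) false).foldl (pvMaxStep h) 0) := by
  set srt := PySem.List.sorted (pvSums coins) (fun x => x) false with hsrt
  have hmem : ∀ x, x ∈ totalsA coins ↔ x ∈ srt := by
    intro x
    rw [mem_totalsA, hsrt, PySem.List.mem_sorted, mem_pvSums]
  rw [possible_eq]
  have hsne : srt ≠ [] := by
    intro hnil
    have : totalsA coins ≠ [] := totalsA_ne_nil coins hc
    cases hx : totalsA coins with
    | nil => exact absurd hx this
    | cons a t =>
      have : a ∈ srt := (hmem a).mp (by simp [hx])
      rw [hnil] at this; exact absurd this (List.not_mem_nil)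
  obtain ⟨m, hfold, hmmem, hmlb⟩ := minFold_nil_init (totalsA coins) (totalsA_ne_nil coins hc)
  cases hs : srt with
  | nil => exact absurd hs hsne
  | cons m' tl =>
    have hm'lb : ∀ y ∈ pvSums coins, m' ≤ y :=
      fun y hy => PySem.List.key_head_sorted_le (pvSums coins) (fun x => x) (hsrt.symm.trans hs) y hy
    have hm'mem : m' ∈ totalsA coins := (hmem m').mpr (by simp [hs])
    have hmm : m = m' := by
      have h1 : m' ≤ m := hm'lb m ((mem_pvSums coins m).mpr ((mem_totalsA coins m).mp hmmem))
      have h2 : m ≤ m' := hmlb m' hm'mem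
      omega
    have hmax : (totalsA coins).foldl (pvMaxStep h) 0 = srt.foldl (pvMaxStep h) 0 :=
      maxFold_congr_mem h _ _ hmem
    rw [hfold, hmax, hs]
    simp [PySem.List.pyGet?, PySem.List.pyIdx?, hmm]

-- ===== VERDICT (by name: the statement is the Claim_ definition above) =====
theorem nearest_leg_lengths_spec : Claim_equal_nearest_leg_lengths := by
  intro coins heights _ hpre
  unfold Spec_nearest_leg_lengths nearest_leg_lengths nearest_leg_lengths_alt
  rw [PySem.List.foldl_append_singleton_eq_map, PySem.List.foldl_append_singleton_eq_map]
  simp only [List.nil_append]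
  cases heights with
  | nil => simp
  | cons h hs =>
    have hc : coins ≠ [] := by
      rcases hpre with hpre | hpre
      · exact absurd hpre (by simp)
      · exact hpre
    apply List.map_congr_left
    intro a _
    rw [bstep_eq_maxStep]
    exact pair_eq coins a hc
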